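-- pv_equiv track=rewrite | github.com/Kappaprideer/ASD | Zadania_na_kolokwium_od_Szymona/ASD - Kolokwium 2/zad5k.py | garek
-- ===== SOURCE A (Python) =====
-- def garek ( A ):
--     n=len(A)
--     tab= [ [ 0 for _ in range(n)] for j in range(n)]
--     for i in range(n):
--         tab[i][i]=A[i]
--
--     for i in range(n-2,-1,-1):
--         for j in range(i+1,n):
--             one=10**10
--             two=10**10
--             three=10**10
--             four=10**10
--             if i+1<n and j-1>=0:
--                 one=tab[i+1][j-1]+A[i]
--                 three=tab[i+1][j-1]+A[j]
--             if i+2<n: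
--                 two=tab[i+2][j]+A[i]
--             if j-2>=0:
--                 four=tab[i][j-2]+A[j]
--             one=min(one,two)
--             three=min(three,four)
--             tab[i][j]=max(one,three)
--
--
--     return tab[0][n-1]
-- ===== SOURCE B (Python) =====
-- def garek(A):
--     n = len(A)
--     memo = {}
--
--     def solve(i, j):
--         if j < i:
--             return 0
--         if i == j:
--             return A[i]
--         key = (i, j)
--         if key in memo:
--             return memo[key]
--         shrink = solve(i + 1, j - 1)
--         one = shrink + A[i]
--         three = shrink + A[j]
--         two = solve(i + 2, j) + A[i] if i + 2 < n else 10 ** 10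
--         four = solve(i, j - 2) + A[j] if j - 2 >= 0 else 10 ** 10
--         res = max(min(one, two), min(three, four))
--         memo[key] = res
--         return res
--
--     return solve(0, n - 1)
-- ===== Notes on version B (the rewrite author's own statement) =====
-- stated objective: alternative
-- what changed: Replaces A's bottom-up n-by-n table filled by reversed index loops with a top-down memoized recursion on intervals (i,j); same O(n^2) states, a different decomposition and traversal order.
import Mathlib
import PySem

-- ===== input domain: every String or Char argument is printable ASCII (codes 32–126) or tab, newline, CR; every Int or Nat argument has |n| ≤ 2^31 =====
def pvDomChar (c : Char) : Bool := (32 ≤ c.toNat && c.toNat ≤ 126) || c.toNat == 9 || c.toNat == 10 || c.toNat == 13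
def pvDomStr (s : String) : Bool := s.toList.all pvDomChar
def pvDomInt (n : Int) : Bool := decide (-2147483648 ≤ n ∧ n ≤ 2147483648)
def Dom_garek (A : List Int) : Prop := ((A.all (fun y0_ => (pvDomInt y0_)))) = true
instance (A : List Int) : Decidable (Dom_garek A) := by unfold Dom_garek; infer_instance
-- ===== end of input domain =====

-- B replaces the bottom-up O(n^2) table with a top-down memoized recursion on intervals (alternative decomposition, same cost).

-- ===== PORT A =====
-- tab[r][c] read/write; inside A every index is guarded nonnegative and < n, so getD/toNat is exact there.
def tget (tab : List (List Int)) (r c : Nat) : Int := (tab.getD r []).getD c 0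

def tset (tab : List (List Int)) (r c : Nat) (v : Int) : List (List Int) :=
  tab.set r ((tab.getD r []).set c v)

def garek (A : List Int) : Int :=
  let n : Int := A.length
  let tab0 : List (List Int) :=
    (PySem.List.pyRange 0 n 1).map (fun _ => (PySem.List.pyRange 0 n 1).map (fun _ => (0 : Int)))
  let tab1 := (PySem.List.pyRange 0 n 1).foldl
    (fun tab i => tset tab i.toNat i.toNat (A.getD i.toNat 0)) tab0
  let tab2 := (PySem.List.pyRange (n - 2) (-1) (-1)).foldl (fun tab i =>
      (PySem.List.pyRange (i + 1) n 1).foldl (fun tab j =>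
        let one := if i + 1 < n ∧ 0 ≤ j - 1 then tget tab (i + 1).toNat (j - 1).toNat + A.getD i.toNat 0 else 10 ^ 10
        let three := if i + 1 < n ∧ 0 ≤ j - 1 then tget tab (i + 1).toNat (j - 1).toNat + A.getD j.toNat 0 else 10 ^ 10
        let two := if i + 2 < n then tget tab (i + 2).toNat j.toNat + A.getD i.toNat 0 else 10 ^ 10
        let four := if 0 ≤ j - 2 then tget tab i.toNat (j - 2).toNat + A.getD j.toNat 0 else 10 ^ 10
        tset tab i.toNat j.toNat (max (min one two) (min three four))) tab) tab1
  tget tab2 0 (n - 1).toNat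

-- ===== PORT B =====
-- top-down recursion; every A-access has a nonnegative in-range index (i = j < n at the diagonal), so getD/toNat is exact.
def solveB (A : List Int) (n : Int) (i j : Int) : Int :=
  if j < i then 0
  else if i = j then A.getD i.toNat 0
  else
    let shrink := solveB A n (i + 1) (j - 1)
    let one := shrink + A.getD i.toNat 0
    let three := shrink + A.getD j.toNat 0
    let two := if i + 2 < n then solveB A n (i + 2) j + A.getD i.toNat 0 else 10 ^ 10
    let four := if 0 ≤ j - 2 then solveB A n i (j - 2) + A.getD j.toNat 0 else 10 ^ 10
    max (min one two) (min three four)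
termination_by (j - i).toNat
decreasing_by all_goals omega

def garek_alt (A : List Int) : Int := solveB A A.length 0 (A.length - 1)

-- ===== PRECONDITION & SPEC =====
-- Pre_ excludes only the empty list, on which A raises IndexError (tab[0][-1] on an empty table).
def Pre_garek (A : List Int) : Prop := A ≠ []
instance (A : List Int) : Decidable (Pre_garek A) := by unfold Pre_garek; infer_instance

def pvWitness_garek : List Int := [3, 1, 2]

def Spec_garek (A : List Int) (out : Int) : Prop := out = garek_alt A
instance (A : List Int) (out : Int) : Decidable (Spec_garek A out) := by unfold Spec_garek; infer_instance

-- ===== CLAIM (what is proved, stated in full; the proofs are below) =====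
def Claim_equal_garek : Prop := ∀ (A : List Int), Dom_garek A → Pre_garek A → Spec_garek A (garek A)

-- ===== LEMMAS AND PROOFS =====

-- shape: an A.length × A.length table
def ShapeN (tab : List (List Int)) (m : Nat) : Prop :=
  tab.length = m ∧ ∀ r : Nat, r < m → (tab.getD r []).length = m

theorem getD_set (l : List Int) (c c' : Nat) (v : Int) :
    (l.set c v).getD c' 0 = if c = c' ∧ c < l.length then v else l.getD c' 0 := by
  rw [List.getD_eq_getElem?_getD, List.getElem?_set]
  by_cases hc : c = c'
  · subst hc
    by_cases hl : c < l.length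
    · simp [hl]
    · simp [hl, List.getD_eq_getElem?_getD]
  · simp [hc, List.getD_eq_getElem?_getD]

theorem row_tset (tab : List (List Int)) (r c : Nat) (v : Int) (r' : Nat) :
    (tset tab r c v).getD r' [] =
      if r = r' ∧ r < tab.length then (tab.getD r []).set c v else tab.getD r' [] := by
  rw [tset, List.getD_eq_getElem?_getD, List.getElem?_set]
  by_cases hr : r = r'
  · subst hr
    by_cases hl : r < tab.length
    · simp [hl]
    · simp [hl, List.getD_eq_getElem?_getD]
  · simp [hr, List.getD_eq_getElem?_getD]

theorem tset_shape (tab : List (List Int)) (m r c : Nat) (v : Int) (h : ShapeN tab m) :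
    ShapeN (tset tab r c v) m := by
  obtain ⟨h1, h2⟩ := h
  refine ⟨by simp [tset, h1], fun r' hr' => ?_⟩
  rw [row_tset]
  split_ifs with hcond
  · rw [List.length_set]
    exact h2 r (by rw [hcond.1]; exact hr')
  · exact h2 r' hr'

theorem tget_tset_eq (tab : List (List Int)) (m r c : Nat) (v : Int) (h : ShapeN tab m)
    (hr : r < m) (hc : c < m) : tget (tset tab r c v) r c = v := by
  obtain ⟨h1, h2⟩ := h
  rw [tget, row_tset, if_pos ⟨rfl, by omega⟩, getD_set, if_pos ⟨rfl, by rw [h2 r hr]; omega⟩]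

theorem tget_tset_ne (tab : List (List Int)) (r c r' c' : Nat) (v : Int)
    (h : r' ≠ r ∨ c' ≠ c) : tget (tset tab r c v) r' c' = tget tab r' c' := by
  rw [tget, row_tset, tget]
  split_ifs with hcond
  · obtain ⟨hrr, _⟩ := hcond
    have hcc : c ≠ c' := by tauto
    rw [getD_set, if_neg (by tauto), hrr]
  · rfl

-- generic loop-invariant lemmas for foldl over ranges
theorem foldl_up_inv {β : Type} (a b : Int) (step : β → Int → β) (Inv : Int → β → Prop)
    (hstep : ∀ x s, a ≤ x → x < b → Inv x s → Inv (x + 1) (step s x)) :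
    ∀ s, Inv a s → a ≤ b → Inv b ((PySem.List.pyRange a b 1).foldl step s) := by
  intro s hs hab
  obtain ⟨k, hk⟩ : ∃ k : Nat, b - a = k := ⟨(b - a).toNat, by omega⟩
  induction k generalizing a s with
  | zero =>
    rw [PySem.List.pyRange_one_eq_nil (by omega)]
    simpa [show b = a by omega] using hs
  | succ k ih =>
    rw [PySem.List.pyRange_one_cons (by omega)]
    simp only [List.foldl_cons]
    exact ih (a + 1) (fun x s hx1 hx2 => hstep x s (by omega) hx2) _
      (hstep a s le_rfl (by omega) hs) (by omega) (by omega)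

theorem foldl_down_inv {β : Type} (a b : Int) (step : β → Int → β) (Inv : Int → β → Prop)
    (hstep : ∀ x s, b < x → x ≤ a → Inv x s → Inv (x - 1) (step s x)) :
    ∀ s, Inv a s → b ≤ a → Inv b ((PySem.List.pyRange a b (-1)).foldl step s) := by
  intro s hs hab
  obtain ⟨k, hk⟩ : ∃ k : Nat, a - b = k := ⟨(a - b).toNat, by omega⟩
  induction k generalizing a s with
  | zero =>
    rw [PySem.List.pyRange_neg_one_eq_nil (by omega)]
    simpa [show b = a by omega] using hs
  | succ k ih =>
    rw [PySem.List.pyRange_neg_one_cons (by omega)]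
    simp only [List.foldl_cons]
    exact ih (a - 1) (fun x s hx1 hx2 => hstep x s hx1 (by omega)) _
      (hstep a s (by omega) le_rfl hs) (by omega) (by omega)

-- basic values of solveB
theorem solveB_lt (A : List Int) (n i j : Int) (h : j < i) : solveB A n i j = 0 := by
  rw [solveB]; simp [h]

theorem solveB_diag (A : List Int) (n i : Int) : solveB A n i i = A.getD i.toNat 0 := by
  rw [solveB]; simp

theorem solveB_unfold (A : List Int) (n i j : Int) (hij : i < j) :
    solveB A n i j =
      max (min (solveB A n (i + 1) (j - 1) + A.getD i.toNat 0)
               (if i + 2 < n then solveB A n (i + 2) j + A.getD i.toNat 0 else 10 ^ 10))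
          (min (solveB A n (i + 1) (j - 1) + A.getD j.toNat 0)
               (if 0 ≤ j - 2 then solveB A n i (j - 2) + A.getD j.toNat 0 else 10 ^ 10)) := by
  rw [solveB]
  rw [if_neg (by omega), if_neg (by omega)]

-- invariant tables (what each cell holds at a given stage of A's loops)
def entry1 (A : List Int) (x : Int) (r c : Nat) : Int :=
  if r < A.length ∧ c < A.length ∧ r = c ∧ (r : Int) < x then A.getD r 0 else 0

def entryI (A : List Int) (i j : Int) (r c : Nat) : Int :=
  if r < A.length ∧ c < A.length then
    (if (c : Int) ≤ (r : Int) ∨ i < (r : Int) ∨ ((r : Int) = i ∧ (c : Int) < j)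
     then solveB A A.length r c else 0)
  else 0

def entryO (A : List Int) (x : Int) (r c : Nat) : Int :=
  if r < A.length ∧ c < A.length then
    (if (c : Int) ≤ (r : Int) ∨ x < (r : Int) then solveB A A.length r c else 0)
  else 0

def InvD (A : List Int) (x : Int) (tab : List (List Int)) : Prop :=
  ShapeN tab A.length ∧ ∀ r c : Nat, tget tab r c = entry1 A x r c

def InvI (A : List Int) (i j : Int) (tab : List (List Int)) : Prop :=
  ShapeN tab A.length ∧ ∀ r c : Nat, tget tab r c = entryI A i j r c

def InvO (A : List Int) (x : Int) (tab : List (List Int)) : Prop :=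
  ShapeN tab A.length ∧ ∀ r c : Nat, tget tab r c = entryO A x r c

theorem diag_step (A : List Int) (x : Int) (tab : List (List Int))
    (hx0 : 0 ≤ x) (hx : x < (A.length : Int)) (h : InvD A x tab) :
    InvD A (x + 1) (tset tab x.toNat x.toNat (A.getD x.toNat 0)) := by
  obtain ⟨hsh, hent⟩ := h
  refine ⟨tset_shape _ A.length _ _ _ hsh, fun r c => ?_⟩
  by_cases hrc : r = x.toNat ∧ c = x.toNat
  · obtain ⟨hr, hc⟩ := hrc; subst hr; subst hc
    rw [tget_tset_eq tab A.length _ _ _ hsh (by omega) (by omega)]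
    unfold entry1
    rw [if_pos ⟨by omega, by omega, rfl, by omega⟩]
  · rw [tget_tset_ne tab _ _ _ _ _ (by tauto), hent]
    unfold entry1
    have hiff : (r < A.length ∧ c < A.length ∧ r = c ∧ (r : Int) < x) ↔
        (r < A.length ∧ c < A.length ∧ r = c ∧ (r : Int) < x + 1) := by omega
    simp only [hiff]

theorem inner_step (A : List Int) (i j : Int) (tab : List (List Int))
    (hi0 : 0 ≤ i) (hij : i + 1 ≤ j) (hj : j < (A.length : Int))
    (h : InvI A i j tab) :
    InvI A i (j + 1)
      (tset tab i.toNat j.toNat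
        (max (min (if i + 1 < (A.length : Int) ∧ 0 ≤ j - 1 then tget tab (i + 1).toNat (j - 1).toNat + A.getD i.toNat 0 else 10 ^ 10)
                  (if i + 2 < (A.length : Int) then tget tab (i + 2).toNat j.toNat + A.getD i.toNat 0 else 10 ^ 10))
             (min (if i + 1 < (A.length : Int) ∧ 0 ≤ j - 1 then tget tab (i + 1).toNat (j - 1).toNat + A.getD j.toNat 0 else 10 ^ 10)
                  (if 0 ≤ j - 2 then tget tab i.toNat (j - 2).toNat + A.getD j.toNat 0 else 10 ^ 10)))) := by
  obtain ⟨hsh, hent⟩ := h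
  have hiN : (i.toNat : Int) = i := Int.toNat_of_nonneg hi0
  have hjN : (j.toNat : Int) = j := Int.toNat_of_nonneg (by omega)
  have hi1N : ((i + 1).toNat : Int) = i + 1 := Int.toNat_of_nonneg (by omega)
  have hj1N : ((j - 1).toNat : Int) = j - 1 := Int.toNat_of_nonneg (by omega)
  have hread1 : tget tab (i + 1).toNat (j - 1).toNat = solveB A A.length (i + 1) (j - 1) := by
    rw [hent]; unfold entryI
    rw [if_pos ⟨by omega, by omega⟩, if_pos (Or.inr (Or.inl (by omega))), hi1N, hj1N]
  have hread2 : i + 2 < (A.length : Int) →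
      tget tab (i + 2).toNat j.toNat = solveB A A.length (i + 2) j := by
    intro h2
    rw [hent]; unfold entryI
    rw [if_pos ⟨by omega, by omega⟩, if_pos (Or.inr (Or.inl (by omega))),
      Int.toNat_of_nonneg (by omega : (0 : Int) ≤ i + 2), hjN]
  have hread4 : 0 ≤ j - 2 → tget tab i.toNat (j - 2).toNat = solveB A A.length i (j - 2) := by
    intro h4
    rw [hent]; unfold entryI
    rw [if_pos ⟨by omega, by omega⟩, if_pos (Or.inr (Or.inr ⟨by omega, by omega⟩)), hiN,
      Int.toNat_of_nonneg h4]
  have hval : (max (min (if i + 1 < (A.length : Int) ∧ 0 ≤ j - 1 then tget tab (i + 1).toNat (j - 1).toNat + A.getD i.toNat 0 else 10 ^ 10)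
                  (if i + 2 < (A.length : Int) then tget tab (i + 2).toNat j.toNat + A.getD i.toNat 0 else 10 ^ 10))
             (min (if i + 1 < (A.length : Int) ∧ 0 ≤ j - 1 then tget tab (i + 1).toNat (j - 1).toNat + A.getD j.toNat 0 else 10 ^ 10)
                  (if 0 ≤ j - 2 then tget tab i.toNat (j - 2).toNat + A.getD j.toNat 0 else 10 ^ 10)))
      = solveB A A.length i j := by
    rw [solveB_unfold A _ i j (by omega)]
    rw [if_pos (⟨by omega, by omega⟩ : i + 1 < (A.length : Int) ∧ 0 ≤ j - 1),
      if_pos (⟨by omega, by omega⟩ : i + 1 < (A.length : Int) ∧ 0 ≤ j - 1), hread1]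
    congr 1
    · congr 1
      by_cases h2 : i + 2 < (A.length : Int)
      · rw [if_pos h2, if_pos h2, hread2 h2]
      · rw [if_neg h2, if_neg h2]
    · congr 1
      by_cases h4 : 0 ≤ j - 2
      · rw [if_pos h4, if_pos h4, hread4 h4]
      · rw [if_neg h4, if_neg h4]
  rw [hval]
  refine ⟨tset_shape _ A.length _ _ _ hsh, fun r c => ?_⟩
  by_cases hrc : r = i.toNat ∧ c = j.toNat
  · obtain ⟨hr, hc⟩ := hrc; subst hr; subst hc
    rw [tget_tset_eq tab A.length _ _ _ hsh (by omega) (by omega)]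
    unfold entryI
    rw [if_pos ⟨by omega, by omega⟩, if_pos (Or.inr (Or.inr ⟨by omega, by omega⟩)), hiN, hjN]
  · rw [tget_tset_ne tab _ _ _ _ _ (by tauto), hent]
    unfold entryI
    by_cases hin : r < A.length ∧ c < A.length
    · rw [if_pos hin, if_pos hin]
      have hiff : ((c : Int) ≤ (r : Int) ∨ i < (r : Int) ∨ ((r : Int) = i ∧ (c : Int) < j)) ↔
          ((c : Int) ≤ (r : Int) ∨ i < (r : Int) ∨ ((r : Int) = i ∧ (c : Int) < j + 1)) := by
        omega
      simp only [hiff]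
    · rw [if_neg hin, if_neg hin]

theorem invD_to_invO (A : List Int) (tab : List (List Int))
    (h : InvD A (A.length : Int) tab) : InvO A ((A.length : Int) - 2) tab := by
  obtain ⟨hsh, hent⟩ := h
  refine ⟨hsh, fun r c => ?_⟩
  rw [hent]
  unfold entry1 entryO
  by_cases hin : r < A.length ∧ c < A.length
  · rw [if_pos hin]
    by_cases hrc : r = c
    · subst hrc
      rw [if_pos ⟨hin.1, hin.2, rfl, by omega⟩, if_pos (Or.inl (by omega)), solveB_diag]
      simp
    · rw [if_neg (by tauto)]
      by_cases hcr : (c : Int) ≤ (r : Int)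
      · rw [if_pos (Or.inl hcr), solveB_lt A _ _ _ (by omega)]
      · rw [if_neg (by omega)]
  · rw [if_neg (by tauto), if_neg hin]

theorem outer_step (A : List Int) (x : Int) (tab : List (List Int))
    (hx0 : -1 < x) (hx : x ≤ (A.length : Int) - 2) (h : InvO A x tab) :
    InvO A (x - 1)
      ((PySem.List.pyRange (x + 1) (A.length : Int) 1).foldl (fun tab j =>
        tset tab x.toNat j.toNat
          (max (min (if x + 1 < (A.length : Int) ∧ 0 ≤ j - 1 then tget tab (x + 1).toNat (j - 1).toNat + A.getD x.toNat 0 else 10 ^ 10)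
                    (if x + 2 < (A.length : Int) then tget tab (x + 2).toNat j.toNat + A.getD x.toNat 0 else 10 ^ 10))
               (min (if x + 1 < (A.length : Int) ∧ 0 ≤ j - 1 then tget tab (x + 1).toNat (j - 1).toNat + A.getD j.toNat 0 else 10 ^ 10)
                    (if 0 ≤ j - 2 then tget tab x.toNat (j - 2).toNat + A.getD j.toNat 0 else 10 ^ 10)))) tab) := by
  have hstart : InvI A x (x + 1) tab := by
    obtain ⟨hsh, hent⟩ := h
    refine ⟨hsh, fun r c => ?_⟩
    rw [hent]
    unfold entryO entryI
    by_cases hin : r < A.length ∧ c < A.length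
    · rw [if_pos hin, if_pos hin]
      have hiff : ((c : Int) ≤ (r : Int) ∨ x < (r : Int)) ↔
          ((c : Int) ≤ (r : Int) ∨ x < (r : Int) ∨ ((r : Int) = x ∧ (c : Int) < x + 1)) := by
        omega
      simp only [hiff]
    · rw [if_neg hin, if_neg hin]
  have hend : InvI A x (A.length : Int)
      ((PySem.List.pyRange (x + 1) (A.length : Int) 1).foldl (fun tab j =>
        tset tab x.toNat j.toNat
          (max (min (if x + 1 < (A.length : Int) ∧ 0 ≤ j - 1 then tget tab (x + 1).toNat (j - 1).toNat + A.getD x.toNat 0 else 10 ^ 10)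
                    (if x + 2 < (A.length : Int) then tget tab (x + 2).toNat j.toNat + A.getD x.toNat 0 else 10 ^ 10))
               (min (if x + 1 < (A.length : Int) ∧ 0 ≤ j - 1 then tget tab (x + 1).toNat (j - 1).toNat + A.getD j.toNat 0 else 10 ^ 10)
                    (if 0 ≤ j - 2 then tget tab x.toNat (j - 2).toNat + A.getD j.toNat 0 else 10 ^ 10)))) tab) :=
    foldl_up_inv (x + 1) (A.length : Int) _ (InvI A x)
      (fun j tab hj1 hj2 hinv => inner_step A x j tab (by omega) hj1 hj2 hinv)
      tab hstart (by omega)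
  obtain ⟨hsh, hent⟩ := hend
  refine ⟨hsh, fun r c => ?_⟩
  rw [hent]
  unfold entryI entryO
  by_cases hin : r < A.length ∧ c < A.length
  · rw [if_pos hin, if_pos hin]
    have hiff : ((c : Int) ≤ (r : Int) ∨ x < (r : Int) ∨ ((r : Int) = x ∧ (c : Int) < (A.length : Int))) ↔
        ((c : Int) ≤ (r : Int) ∨ x - 1 < (r : Int)) := by
      omega
    simp only [hiff]
  · rw [if_neg hin, if_neg hin]

theorem tab0_inv (A : List Int) :
    InvD A 0 ((PySem.List.pyRange 0 (A.length : Int) 1).map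
      (fun _ => (PySem.List.pyRange 0 (A.length : Int) 1).map (fun _ => (0 : Int)))) := by
  have hlen : (PySem.List.pyRange 0 (A.length : Int) 1).length = A.length := by
    rw [PySem.List.length_pyRange_one]; omega
  have hrep : (PySem.List.pyRange 0 (A.length : Int) 1).map
      (fun _ => (PySem.List.pyRange 0 (A.length : Int) 1).map (fun _ => (0 : Int)))
      = List.replicate A.length (List.replicate A.length (0 : Int)) := by
    rw [List.map_const', List.map_const', hlen]
  rw [hrep]
  have hrow : ∀ r : Nat, r < A.length →
      (List.replicate A.length (List.replicate A.length (0 : Int))).getD r []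
        = List.replicate A.length (0 : Int) := by
    intro r hr
    rw [List.getD_eq_getElem?_getD, List.getElem?_replicate, if_pos hr]
    rfl
  refine ⟨⟨List.length_replicate, fun r hr => by rw [hrow r hr, List.length_replicate]⟩,
    fun r c => ?_⟩
  unfold entry1
  rw [if_neg (by omega)]
  by_cases hr : r < A.length
  · rw [tget, hrow r hr, List.getD_eq_getElem?_getD, List.getElem?_replicate]
    split_ifs <;> rfl
  · have hempty : (List.replicate A.length (List.replicate A.length (0 : Int))).getD r [] = [] := by
      rw [List.getD_eq_getElem?_getD, List.getElem?_replicate, if_neg hr]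
      rfl
    rw [tget, hempty]
    rfl

theorem garek_spec' (A : List Int) (h : A ≠ []) : garek A = garek_alt A := by
  have hm : 0 < A.length := by cases A with | nil => exact absurd rfl h | cons a l => simp
  simp only [garek]
  have h1 : InvD A (A.length : Int)
      ((PySem.List.pyRange 0 (A.length : Int) 1).foldl
        (fun tab i => tset tab i.toNat i.toNat (A.getD i.toNat 0))
        ((PySem.List.pyRange 0 (A.length : Int) 1).map
          (fun _ => (PySem.List.pyRange 0 (A.length : Int) 1).map (fun _ => (0 : Int))))) :=
    foldl_up_inv 0 (A.length : Int) _ (InvD A)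
      (fun x tab hx1 hx2 hinv => diag_step A x tab hx1 hx2 hinv)
      _ (tab0_inv A) (by omega)
  have h2 := foldl_down_inv ((A.length : Int) - 2) (-1) _ (InvO A)
    (fun x tab hx1 hx2 hinv => outer_step A x tab hx1 hx2 hinv)
    _ (invD_to_invO A _ h1) (by omega)
  rw [h2.2 0 ((A.length : Int) - 1).toNat]
  unfold entryO
  rw [if_pos ⟨hm, by omega⟩, if_pos (Or.inr (by omega)), garek_alt,
    Int.toNat_of_nonneg (by omega : (0 : Int) ≤ (A.length : Int) - 1)]
  norm_num

-- ===== VERDICT (by name: the statement is the Claim_ definition above) =====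
theorem garek_spec : Claim_equal_garek := by
  intro A _ hpre
  unfold Spec_garek
  exact garek_spec' A hpre
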